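-- pv_equiv track=rewrite | github.com/arc-l/rubik-table | 2d/rth/path_refine.py | count_conficts
-- ===== SOURCE A (Python) =====
-- def count_conficts(paths):
--     conflicts=dict()
--     for p in paths:
--         for t in range(len(p)):
--             if (p[t],t) not in conflicts:
--                 conflicts[(p[t],t)]=0
--             else:
--                 conflicts[(p[t],t)]=conflicts[(p[t],t)]+1
--     numConflicts=0
--     for key,value in conflicts.items():
--         numConflicts=numConflicts+value
--     return numConflicts
-- ===== SOURCE B (Python) =====
-- def count_conficts(paths):
--     events = sorted((v, t) for p in paths for t, v in enumerate(p))
--     return sum(x == y for x, y in zip(events, events[1:]))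
-- ===== Notes on version B (the rewrite author's own statement) =====
-- stated objective: alternative
-- what changed: Replaces the occurrence-counting dict plus a value-summation pass by sort-then-scan: flatten all (value, time) events, sort them, and count adjacent equal pairs, which equals the per-key excess occurrences.
import Mathlib
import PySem

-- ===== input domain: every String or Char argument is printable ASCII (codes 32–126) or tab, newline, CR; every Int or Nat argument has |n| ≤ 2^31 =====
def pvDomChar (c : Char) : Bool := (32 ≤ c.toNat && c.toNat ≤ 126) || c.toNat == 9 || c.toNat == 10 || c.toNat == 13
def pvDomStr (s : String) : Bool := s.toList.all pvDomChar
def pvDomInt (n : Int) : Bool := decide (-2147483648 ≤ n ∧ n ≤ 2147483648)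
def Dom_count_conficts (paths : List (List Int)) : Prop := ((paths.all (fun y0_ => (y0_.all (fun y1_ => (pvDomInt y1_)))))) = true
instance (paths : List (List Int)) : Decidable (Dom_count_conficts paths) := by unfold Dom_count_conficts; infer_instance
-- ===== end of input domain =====

-- B replaces A's occurrence-counting dict and value-summation pass by sort-then-scan over the
-- flattened (value, time) events, counting adjacent equal pairs (objective: alternative algorithm).

-- ===== PORT A =====
def count_conficts (paths : List (List Int)) : Int :=
  let conflicts : PySem.Dict (Int × Int) Int :=
    paths.foldl (fun conflicts p =>
      (PySem.List.pyRange 0 (PySem.List.len p) 1).foldl (fun conflicts t =>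
        if !(conflicts.contains (PySem.List.pyGetD p t 0, t)) then
          conflicts.insert (PySem.List.pyGetD p t 0, t) 0
        else
          -- in this branch the key is present, so getD … 0 is exactly Python's conflicts[(p[t],t)]
          conflicts.insert (PySem.List.pyGetD p t 0, t)
            (conflicts.getD (PySem.List.pyGetD p t 0, t) 0 + 1)) conflicts) PySem.Dict.empty
  conflicts.items.foldl (fun numConflicts kv => numConflicts + kv.2) 0

-- ===== PORT B =====
-- Python's tuple comparison in sorted(...) is the lexicographic order: key = toLex
def count_conficts_alt (paths : List (List Int)) : Int :=
  let events : List (Int × Int) :=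
    PySem.List.sorted (paths.flatMap (fun p => (PySem.List.enumerate p).map (fun tv => (tv.2, tv.1))))
      (fun e => (toLex e : Lex (Int × Int)))
  ((events.zip (events.drop 1)).map (fun xy => if xy.1 = xy.2 then (1 : Int) else 0)).sum

-- ===== PRECONDITION & SPEC =====
def Spec_count_conficts (paths : List (List Int)) (out : Int) : Prop := out = count_conficts_alt paths
instance (paths : List (List Int)) (out : Int) : Decidable (Spec_count_conficts paths out) := by
  unfold Spec_count_conficts; infer_instance

-- ===== CLAIM (what is proved, stated in full; the proofs are below) =====
def Claim_equal_count_conficts : Prop :=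
  ∀ (paths : List (List Int)), Dom_count_conficts paths → Spec_count_conficts paths (count_conficts paths)

-- ===== LEMMAS AND PROOFS =====

-- the flattened (value, time) event stream both programs consume
def pvEv (paths : List (List Int)) : List (Int × Int) :=
  paths.flatMap (fun p => (PySem.List.enumerate p).map (fun tv => (tv.2, tv.1)))

-- A's inner-loop body as a function of the event key
def pvStep (d : PySem.Dict (Int × Int) Int) (k : Int × Int) : PySem.Dict (Int × Int) Int :=
  if !(d.contains k) then d.insert k 0 else d.insert k (d.getD k 0 + 1)

lemma pvStep_eq_insert (d : PySem.Dict (Int × Int) Int) (k : Int × Int) :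
    pvStep d k = d.insert k (if d.contains k = true then d.getD k 0 + 1 else 0) := by
  unfold pvStep
  cases h : d.contains k
  · simp
  · simp

-- the invariant quantity: stored value plus one-if-present = number of occurrences so far
def pvG (d : PySem.Dict (Int × Int) Int) (v : Int × Int) : Int :=
  d.getD v 0 + (if d.contains v = true then 1 else 0)

lemma pvG_step (d : PySem.Dict (Int × Int) Int) (k v : Int × Int) :
    pvG (pvStep d k) v = pvG d v + (if v = k then 1 else 0) := by
  rw [pvStep_eq_insert]; unfold pvG
  by_cases hv : v = k
  · subst hv
    rw [PySem.Dict.getD_insert_self, PySem.Dict.contains_insert_self]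
    cases h : d.contains v
    · simp [PySem.Dict.getD_of_not_contains d 0 h]
    · simp
  · rw [PySem.Dict.getD_insert_of_ne d _ _ hv, PySem.Dict.contains_insert]
    simp [hv]

lemma pvG_foldl (l : List (Int × Int)) (d : PySem.Dict (Int × Int) Int) (v : Int × Int) :
    pvG (l.foldl pvStep d) v = pvG d v + l.count v := by
  induction l generalizing d with
  | nil => simp
  | cons k l ih =>
    rw [List.foldl_cons, ih, pvG_step]
    by_cases hv : v = k
    · simp [hv]; ring
    · simp [hv, List.count_cons]
      exact fun h => hv h.symm

lemma pvKeys_foldl (l : List (Int × Int)) (d : PySem.Dict (Int × Int) Int) :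
    (l.foldl pvStep d).keys = PySem.Set.update d.keys l := by
  have h : pvStep = fun d k => d.insert k (if d.contains k = true then d.getD k 0 + 1 else 0) :=
    funext fun d => funext fun k => pvStep_eq_insert d k
  rw [h]; exact PySem.Dict.keys_foldl_insert l _ d

lemma pvNodup_foldl (l : List (Int × Int)) (d : PySem.Dict (Int × Int) Int)
    (h : d.keys.Nodup) : (l.foldl pvStep d).keys.Nodup := by
  have he : pvStep = fun d k => d.insert k (if d.contains k = true then d.getD k 0 + 1 else 0) :=
    funext fun d => funext fun k => pvStep_eq_insert d k
  rw [he]; exact PySem.Dict.nodup_keys_foldl_insert l _ d h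

lemma pv_sum_sub_one {α : Type} (l : List α) (f : α → Int) :
    (l.map (fun k => f k - 1)).sum = (l.map f).sum - l.length := by
  induction l with
  | nil => simp
  | cons a t ih => simp [ih]; ring

lemma pvOfList_perm_dedup (l : List (Int × Int)) :
    (PySem.Set.ofList l).Perm l.dedup :=
  (List.perm_ext_iff_of_nodup (PySem.Set.nodup_ofList l) (List.nodup_dedup l)).mpr
    (by intro a; simp [PySem.Set.mem_ofList])

-- A computes (#events) − (#distinct events)
lemma pvA_eq (paths : List (List Int)) :
    count_conficts paths = ((pvEv paths).length : Int) - ((pvEv paths).dedup.length : Int) := by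
  have hnorm : count_conficts paths =
      ((pvEv paths).foldl pvStep PySem.Dict.empty).items.foldl (fun n kv => n + kv.2) 0 := by
    simp only [count_conficts, pvEv, List.foldl_flatMap, List.foldl_map,
      PySem.List.enumerate_eq_map_pyRange (d := (0 : Int))]
    rfl
  set es := pvEv paths with hes
  set dfin := es.foldl pvStep PySem.Dict.empty with hd
  have hnd : dfin.keys.Nodup := pvNodup_foldl es _ (by simp)
  have hkeys : dfin.keys = PySem.Set.ofList es := by
    rw [hd, pvKeys_foldl]; simp [PySem.Set.update_nil_left]
  have hsum : dfin.items.foldl (fun n kv => n + kv.2) 0 = (dfin.values).sum := by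
    rw [PySem.List.foldl_add (g := fun kv : (Int × Int) × Int => kv.2)]
    simp [PySem.Dict.values]
  have hvals : dfin.values = dfin.keys.map (fun k => dfin.getD k 0) :=
    PySem.Dict.values_eq_map_keys dfin hnd 0
  have hgetD : ∀ k ∈ PySem.Set.ofList es, dfin.getD k 0 = (es.count k : Int) - 1 := by
    intro k hk
    have hc : dfin.contains k = true := by
      rw [PySem.Dict.contains_iff_mem_keys, hkeys]; exact hk
    have hg := pvG_foldl es PySem.Dict.empty k
    rw [← hd] at hg
    unfold pvG at hg
    simp [hc, PySem.Dict.getD_empty, PySem.Dict.contains_empty] at hg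
    omega
  have hperm := pvOfList_perm_dedup es
  rw [hnorm, hsum, hvals, hkeys]
  rw [List.map_congr_left hgetD, pv_sum_sub_one]
  have hcnt : ((PySem.Set.ofList es).map (fun k => (es.count k : Int))).sum = (es.length : Int) := by
    rw [(hperm.map (fun k => (es.count k : Int))).sum_eq]
    have hc : ∀ k : Int × Int, es.count k = @List.count _ instBEqOfDecidableEq k es := by
      intro k
      rw [@List.count_eq_countP _ instBEqOfDecidableEq, List.count_eq_countP]
      apply List.countP_congr; intro x _; simp
    calc (es.dedup.map (fun k => (es.count k : Int))).sum
        = ((es.dedup.map (fun k => @List.count _ instBEqOfDecidableEq k es)).map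
            (Nat.cast : Nat → Int)).sum := by
          rw [List.map_map]
          exact congrArg _ (List.map_congr_left (fun k _ => by rw [hc k]; rfl))
      _ = ((es.dedup.map (fun k => @List.count _ instBEqOfDecidableEq k es)).sum : Int) :=
          (Nat.cast_list_sum _).symm
      _ = (es.length : Int) := by
          exact_mod_cast congrArg (Nat.cast : Nat → Int) (List.sum_map_count_dedup_eq_length es)
  rw [hcnt, hperm.length_eq]

-- adjacent-equal count of a lexicographically sorted list = length − #distinct
def pvAdj (l : List (Int × Int)) : Int :=
  ((l.zip (l.drop 1)).map (fun xy => if xy.1 = xy.2 then (1 : Int) else 0)).sum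

lemma pvAdj_of_sorted : ∀ (l : List (Int × Int)),
    l.Pairwise (fun a b => (toLex a : Lex (Int × Int)) ≤ toLex b) →
    pvAdj l = (l.length : Int) - (l.dedup.length : Int) := by
  intro l
  induction l with
  | nil => intro _; simp [pvAdj]
  | cons a t ih =>
    intro hp
    cases t with
    | nil => simp [pvAdj]
    | cons b t' =>
      have hp' : (b :: t').Pairwise (fun x y => (toLex x : Lex (Int × Int)) ≤ toLex y) :=
        hp.of_cons
      have hrec := ih hp'
      by_cases hab : a = b
      · have hmem : a ∈ b :: t' := by simp [hab]
        rw [List.dedup_cons_of_mem hmem]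
        have : pvAdj (a :: b :: t') = 1 + pvAdj (b :: t') := by
          simp [pvAdj, hab]
        rw [this, hrec]; simp only [List.length_cons]; push_cast; ring
      · have hmem : a ∉ b :: t' := by
          intro hm
          rcases List.mem_cons.mp hm with h | h
          · exact hab h
          · -- a later than b yet ≤ b in the sorted order forces a = b
            have h1 : (toLex a : Lex (Int × Int)) ≤ toLex b :=
              (List.pairwise_cons.mp hp).1 b (by simp)
            have h2 : (toLex b : Lex (Int × Int)) ≤ toLex a :=
              (List.pairwise_cons.mp hp').1 a h
            exact hab (toLex_inj.mp (le_antisymm h1 h2))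
        rw [List.dedup_cons_of_notMem hmem]
        have : pvAdj (a :: b :: t') = 0 + pvAdj (b :: t') := by
          simp [pvAdj, hab]
        rw [this, hrec]
        simp only [List.length_cons]; push_cast; ring

lemma pvB_eq (paths : List (List Int)) :
    count_conficts_alt paths = ((pvEv paths).length : Int) - ((pvEv paths).dedup.length : Int) := by
  have hnorm : count_conficts_alt paths =
      pvAdj (PySem.List.sorted (pvEv paths) (fun e => (toLex e : Lex (Int × Int)))) := rfl
  set ss := PySem.List.sorted (pvEv paths) (fun e => (toLex e : Lex (Int × Int))) with hss
  have hperm : ss.Perm (pvEv paths) := PySem.List.sorted_perm _ _ _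
  have hpw : ss.Pairwise (fun a b => (toLex a : Lex (Int × Int)) ≤ toLex b) :=
    PySem.List.sorted_pairwise _ _
  rw [hnorm, pvAdj_of_sorted ss hpw, hperm.length_eq, hperm.dedup.length_eq]

-- ===== VERDICT (by name: the statement is the Claim_ definition above) =====
theorem count_conficts_spec : Claim_equal_count_conficts := by
  intro paths _
  unfold Spec_count_conficts
  rw [pvA_eq, pvB_eq]
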